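-- pv_equiv track=rewrite | github.com/NivBar/Thesis---Faithfulness-Analysis | text_handling_funcs.py | remove_sentences_second
-- ===== SOURCE A (Python) =====
-- def remove_sentences_second(sentences):
--     # Calculate the initial total number of words
--     total_words = sum(len(sentence.split()) for sentence in sentences)
--
--     # Check if total_words is already within the desired range or below 120
--     if total_words <= 150:
--         return sentences
--
--     # Find and remove a sentence if total_words can be adjusted within the desired range
--     while total_words > 150:
--         for sentence in sorted(sentences, key=len):
--             # Calculate the updated total number of words without the current sentence
--             updated_total_words = total_words - len(sentence.split())
--             if updated_total_words <= 150:
--                 total_words = updated_total_words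
--                 sentences.remove(sentence)
--                 return sentences
--
--         # Remove the shortest sentence if no sentence can be removed to meet the desired range or below 120
--         if total_words > 150:
--             shortest_sentence = min(sentences, key=lambda sentence: len(sentence))
--             sentences.remove(shortest_sentence)
--             total_words = total_words - len(shortest_sentence.split())
--     return sentences
-- ===== SOURCE B (Python) =====
-- def remove_sentences_second(sentences):
--     # One stable sort up front; running totals + suffix maxima replace A's
--     # per-round re-sorting and re-splitting. Mutates `sentences` like A does.
--     total = sum(len(s.split()) for s in sentences)
--     if total <= 150:
--         return sentences
--
--     ss = sorted(sentences, key=len)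
--     w = [len(s.split()) for s in ss]
--     sufmax = [0] * (len(ss) + 1)
--     for j in range(len(ss) - 1, -1, -1):
--         sufmax[j] = max(sufmax[j + 1], w[j])
--
--     k = 0          # number of shortest sentences dropped so far
--     fin = None     # index in ss of the single "finishing" removal, if any
--     while total > 150:
--         need = total - 150
--         if sufmax[k] >= need:
--             j = k
--             while w[j] < need:
--                 j += 1
--             fin = j
--             break
--         total -= w[k]
--         k += 1
--
--     for v in ss[:k]:
--         sentences.remove(v)
--     if fin is not None:
--         sentences.remove(ss[fin])
--     return sentences
-- ===== Notes on version B (the rewrite author's own statement) =====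
-- stated objective: faster
-- what changed: B sorts once and precomputes word counts and suffix maxima, then walks the sorted order with a running total, instead of A's re-sorting, re-splitting and rescanning the whole list on every removal round.
import Mathlib
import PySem

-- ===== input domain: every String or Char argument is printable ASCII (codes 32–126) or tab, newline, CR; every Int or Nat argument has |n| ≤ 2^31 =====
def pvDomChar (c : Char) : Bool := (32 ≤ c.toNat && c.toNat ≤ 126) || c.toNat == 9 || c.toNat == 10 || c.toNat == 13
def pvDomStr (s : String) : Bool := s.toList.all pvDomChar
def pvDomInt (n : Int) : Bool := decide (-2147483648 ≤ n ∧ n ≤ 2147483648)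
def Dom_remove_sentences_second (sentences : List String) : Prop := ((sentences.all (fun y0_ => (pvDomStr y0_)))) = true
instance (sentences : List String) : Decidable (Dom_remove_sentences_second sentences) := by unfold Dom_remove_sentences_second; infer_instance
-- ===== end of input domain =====

-- B replaces A's per-round re-sort/re-split with one stable sort, precomputed word
-- counts and suffix maxima plus a running total (objective: faster). Both A and B
-- mutate the argument list in Python identically; the theorems are about the return value.

-- ===== PORT A =====

-- len(sentence.split()) as an Int
def pvWc (s : String) : Int := ((PySem.Str.split₀ s).length : Int)

-- key=len
def pvKey (s : String) : Int := PySem.Str.len s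

-- A's inner `for sentence in sorted(sentences, key=len)` scan: the first sentence
-- whose single removal brings the total to ≤ 150
def pvFindFin (total : Int) : List String → Option String
  | [] => none
  | s :: rest => if total - pvWc s ≤ 150 then some s else pvFindFin total rest

-- A's `while total_words > 150` loop; each pass removes exactly one sentence, so
-- fuel = sentences.length is enough (the guard only makes the recursion total)
def pvALoop : Nat → List String → Int → List String
  | 0, sentences, _ => sentences
  | fuel + 1, sentences, total =>
    if total ≤ 150 then sentences
    else
      match pvFindFin total (PySem.List.sorted sentences pvKey) with
      | some s => (PySem.List.remove? sentences s).getD sentences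
      | none =>
        -- the trailing `if total_words > 150` re-check is always true here (total unchanged)
        match PySem.List.min? sentences pvKey with
        | some m => pvALoop fuel ((PySem.List.remove? sentences m).getD sentences) (total - pvWc m)
        | none => sentences  -- unreachable: total > 150 forces sentences ≠ []

def remove_sentences_second (sentences : List String) : List String :=
  let total := (sentences.map pvWc).sum
  if total ≤ 150 then sentences
  else pvALoop sentences.length sentences total

-- ===== PORT B =====

-- Source B's sufmax array, built back to front (sufmax[j] = max(sufmax[j+1], w[j]))
def pvSufmax : List Int → List Int
  | [] => [0]
  | w :: rest =>
    let r := pvSufmax rest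
    (max (r.headD 0) w) :: r

-- Source B's inner `while w[j] < need: j += 1` scan, as an offset from k
def pvScanFin (need : Int) : List Int → Option Nat
  | [] => none
  | w :: rest => if w < need then (pvScanFin need rest).map (· + 1) else some 0

-- Source B's `while total > 150` loop; wsuf = w[k:], smsuf = sufmax[k:]
def pvBLoop (wsuf smsuf : List Int) (total : Int) (k : Nat) : Nat × Option Nat :=
  if total > 150 then
    if smsuf.headD 0 ≥ total - 150 then
      (k, (pvScanFin (total - 150) wsuf).map (k + ·))
    else
      match wsuf with
      | [] => (k, none)  -- unreachable: total = sum of wsuf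
      | w :: rest => pvBLoop rest smsuf.tail (total - w) (k + 1)
  else (k, none)

-- Source B's `for v in ss[:k]: sentences.remove(v)`
def pvRemoveEach : List String → List String → List String
  | sentences, [] => sentences
  | sentences, v :: vs => pvRemoveEach ((PySem.List.remove? sentences v).getD sentences) vs

def remove_sentences_second_alt (sentences : List String) : List String :=
  let total := (sentences.map pvWc).sum
  if total ≤ 150 then sentences
  else
    let ss := PySem.List.sorted sentences pvKey
    let w := ss.map pvWc
    let res := pvBLoop w (pvSufmax w) total 0
    let afterPrefix := pvRemoveEach sentences (ss.take res.1)
    match res.2 with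
    | some j => (PySem.List.remove? afterPrefix (ss.getD j "")).getD afterPrefix
    | none => afterPrefix

-- ===== PRECONDITION & SPEC =====
def Spec_remove_sentences_second (sentences : List String) (out : List String) : Prop := out = remove_sentences_second_alt sentences
instance (sentences : List String) (out : List String) : Decidable (Spec_remove_sentences_second sentences out) := by unfold Spec_remove_sentences_second; infer_instance

-- ===== CLAIM (what is proved, stated in full; the proofs are below) =====
def Claim_equal_remove_sentences_second : Prop := ∀ (sentences : List String), Dom_remove_sentences_second sentences → Spec_remove_sentences_second sentences (remove_sentences_second sentences)

-- ===== LEMMAS AND PROOFS =====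

lemma pv_sorted_concat (l : List String) (x : String) :
    PySem.List.sorted (l ++ [x]) pvKey =
      PySem.List.insertBy (fun a b => decide (pvKey a < pvKey b)) x (PySem.List.sorted l pvKey) := by
  rw [PySem.List.sorted_eq_foldl_insertBy, PySem.List.sorted_eq_foldl_insertBy, List.foldl_append]
  rfl

lemma pv_insertBy_cons (before : String → String → Bool) (x y : String) (ys : List String) :
    PySem.List.insertBy before x (y :: ys) =
      if before x y then x :: y :: ys else y :: PySem.List.insertBy before x ys := by
  simp [PySem.List.insertBy]

lemma pv_min_concat_none (l : List String) (x : String) (h : PySem.List.min? l pvKey = none) :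
    PySem.List.min? (l ++ [x]) pvKey = some x := by
  unfold PySem.List.min? at h ⊢
  rw [List.foldl_append, h]
  rfl

lemma pv_min_concat_some (l : List String) (x m : String) (h : PySem.List.min? l pvKey = some m) :
    PySem.List.min? (l ++ [x]) pvKey = if pvKey x < pvKey m then some x else some m := by
  unfold PySem.List.min? at h ⊢
  rw [List.foldl_append, h]
  rfl

lemma pv_min_eq_head_sorted (l : List String) :
    PySem.List.min? l pvKey = (PySem.List.sorted l pvKey).head? := by
  induction l using List.reverseRecOn with
  | nil => rfl
  | append_singleton l₀ x ih =>
    rw [pv_sorted_concat]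
    cases hs : PySem.List.sorted l₀ pvKey with
    | nil =>
      have h0 : PySem.List.min? l₀ pvKey = none := by rw [ih, hs]; rfl
      rw [pv_min_concat_none l₀ x h0]
      rfl
    | cons m₀ t₀ =>
      have h0 : PySem.List.min? l₀ pvKey = some m₀ := by rw [ih, hs]; rfl
      rw [pv_min_concat_some l₀ x m₀ h0, pv_insertBy_cons]
      by_cases hx : pvKey x < pvKey m₀
      · rw [if_pos hx, if_pos (by simp [hx])]
        rfl
      · rw [if_neg hx, if_neg (by simp [hx])]
        rfl

lemma pv_sorted_erase (l : List String) (m : String) (t : List String)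
    (h : PySem.List.sorted l pvKey = m :: t) :
    PySem.List.sorted (l.erase m) pvKey = t := by
  induction l using List.reverseRecOn generalizing m t with
  | nil =>
    have h' : ([] : List String) = m :: t := h
    exact absurd h'.symm (List.cons_ne_nil m t)
  | append_singleton l₀ x ih =>
    rw [pv_sorted_concat] at h
    cases hs : PySem.List.sorted l₀ pvKey with
    | nil =>
      have hl₀ : l₀ = [] := (PySem.List.sorted_eq_nil_iff _ _ _).mp hs
      subst hl₀
      have h' : [x] = m :: t := h
      injection h' with hm ht
      subst hm; subst ht
      rw [show (([] : List String) ++ [x]).erase x = [] by simp]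
      rfl
    | cons m₀ t₀ =>
      rw [hs, pv_insertBy_cons] at h
      by_cases hx : pvKey x < pvKey m₀
      · rw [if_pos (by simp [hx])] at h
        injection h with hm ht
        subst hm
        have hnot : x ∉ l₀ := by
          intro hmem
          have := PySem.List.key_head_sorted_le l₀ pvKey hs x hmem
          omega
        rw [List.erase_append_right _ hnot]
        simpa [hs] using ht
      · rw [if_neg (by simp [hx])] at h
        injection h with hm ht
        subst hm
        have hmem : m₀ ∈ l₀ := (PySem.List.mem_sorted l₀ pvKey false m₀).mp (by rw [hs]; exact List.mem_cons_self)
        rw [List.erase_append_left _ hmem, ← ht]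
        rw [pv_sorted_concat, ih m₀ t₀ hs]

lemma pv_findFin_eq_scan (total : Int) (ss : List String) :
    pvFindFin total ss = (pvScanFin (total - 150) (ss.map pvWc)).map (fun j => ss.getD j "") := by
  induction ss with
  | nil => rfl
  | cons s rest ih =>
    simp only [pvFindFin, List.map_cons, pvScanFin]
    by_cases hc : total - pvWc s ≤ 150
    · have : ¬ pvWc s < total - 150 := by omega
      simp [hc, this]
    · have : pvWc s < total - 150 := by omega
      simp [hc, this, ih, Option.map_map]
      rfl

lemma pv_scan_none_iff (need : Int) (ws : List Int) :
    pvScanFin need ws = none ↔ ∀ w ∈ ws, w < need := by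
  induction ws with
  | nil => simp [pvScanFin]
  | cons w rest ih =>
    by_cases hw : w < need <;> simp [pvScanFin, hw, ih]

lemma pv_sufmax_guard (ws : List Int) (need : Int) (hneed : 0 < need) :
    (pvSufmax ws).headD 0 ≥ need ↔ ∃ w ∈ ws, need ≤ w := by
  induction ws with
  | nil => simp [pvSufmax]; omega
  | cons w rest ih =>
    simp only [pvSufmax, List.headD_cons, le_max_iff, ge_iff_le] at *
    constructor
    · rintro (h | h)
      · obtain ⟨v, hv, hvn⟩ := ih.mp h
        exact ⟨v, List.mem_cons_of_mem _ hv, hvn⟩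
      · exact ⟨w, List.mem_cons_self, h⟩
    · rintro ⟨v, hv, hvn⟩
      rcases List.mem_cons.mp hv with h | h
      · right; omega
      · left; exact ih.mpr ⟨v, h, hvn⟩

lemma pv_bloop_shift (ws : List Int) (sm : List Int) (total : Int) (k : Nat) :
    pvBLoop ws sm total k =
      ((pvBLoop ws sm total 0).1 + k, (pvBLoop ws sm total 0).2.map (k + ·)) := by
  induction ws generalizing sm total k with
  | nil =>
    unfold pvBLoop
    by_cases h1 : total > 150 <;> by_cases h2 : sm.headD 0 ≥ total - 150 <;>
      simp [h1, pvScanFin]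
  | cons w rest ih =>
    unfold pvBLoop
    by_cases h1 : total > 150
    · by_cases h2 : sm.headD 0 ≥ total - 150
      · rw [if_pos h1, if_pos h2, if_pos h1, if_pos h2]
        rw [Prod.ext_iff]
        refine ⟨by omega, ?_⟩
        simp only [Option.map_map]
        congr 1
        funext j
        simp
      · rw [if_pos h1, if_neg h2, if_pos h1, if_neg h2]
        show pvBLoop rest sm.tail (total - w) (k + 1) =
          ((pvBLoop rest sm.tail (total - w) 1).1 + k,
            Option.map (k + ·) (pvBLoop rest sm.tail (total - w) 1).2)
        rw [ih sm.tail (total - w) (k + 1), ih sm.tail (total - w) 1]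
        rw [Prod.ext_iff]
        refine ⟨by simp; omega, ?_⟩
        simp only [Option.map_map]
        congr 1
        funext j
        simp
        omega
    · rw [if_neg h1, if_neg h1]
      simp

-- B's code after the `total > 150` check, as one function of the sorted list (proof-side view of _alt)
def pvBRun (ss l : List String) (total : Int) : List String :=
  let res := pvBLoop (ss.map pvWc) (pvSufmax (ss.map pvWc)) total 0
  let afterPrefix := pvRemoveEach l (ss.take res.1)
  match res.2 with
  | some j => (PySem.List.remove? afterPrefix (ss.getD j "")).getD afterPrefix
  | none => afterPrefix

lemma pv_bloop_done (wsuf sm : List Int) (total : Int) (h : ¬ total > 150) :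
    pvBLoop wsuf sm total 0 = (0, none) := by
  conv_lhs => rw [pvBLoop.eq_def]
  rw [if_neg h]

lemma pv_bloop_fin (wsuf sm : List Int) (total : Int)
    (htgt : total > 150) (hg : sm.headD 0 ≥ total - 150) :
    pvBLoop wsuf sm total 0 = (0, (pvScanFin (total - 150) wsuf).map (0 + ·)) := by
  conv_lhs => rw [pvBLoop.eq_def]
  rw [if_pos htgt, if_pos hg]

lemma pv_bloop_step (w : Int) (rest sm : List Int) (total : Int)
    (htgt : total > 150) (hg : ¬ sm.headD 0 ≥ total - 150) :
    pvBLoop (w :: rest) sm total 0 =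
      ((pvBLoop rest sm.tail (total - w) 0).1 + 1,
        (pvBLoop rest sm.tail (total - w) 0).2.map (1 + ·)) := by
  conv_lhs => rw [pvBLoop]
  rw [if_pos htgt, if_neg hg]
  exact pv_bloop_shift rest sm.tail (total - w) 1

lemma pv_brun_step (m : String) (t l : List String) (total : Int)
    (htgt : total > 150)
    (hg : ¬ (pvSufmax ((m :: t).map pvWc)).headD 0 ≥ total - 150)
    (hrem : PySem.List.remove? l m = some (l.erase m)) :
    pvBRun (m :: t) l total = pvBRun t (l.erase m) (total - pvWc m) := by
  have htail : (pvSufmax (pvWc m :: List.map pvWc t)).tail = pvSufmax (List.map pvWc t) := rfl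
  simp only [pvBRun, List.map_cons] at hg ⊢
  rw [pv_bloop_step _ _ _ _ htgt hg, htail]
  cases hb : (pvBLoop (t.map pvWc) (pvSufmax (t.map pvWc)) (total - pvWc m) 0).2 with
  | none =>
    simp only [Option.map_none]
    rw [List.take_succ_cons]
    simp only [pvRemoveEach, hrem, Option.getD_some]
  | some j =>
    simp only [Option.map_some]
    rw [List.take_succ_cons]
    simp only [pvRemoveEach, hrem, Option.getD_some]
    have hidx : (m :: t).getD (1 + j) "" = t.getD j "" := by
      rw [Nat.add_comm]
      rfl
    rw [hidx]

lemma pv_main (ss : List String) :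
    ∀ (l : List String) (total : Int) (fuel : Nat),
      PySem.List.sorted l pvKey = ss →
      total = (ss.map pvWc).sum →
      l.length ≤ fuel →
      pvALoop fuel l total = pvBRun ss l total := by
  induction ss with
  | nil =>
    intro l total fuel hss htot hfuel
    have hl : l = [] := (PySem.List.sorted_eq_nil_iff _ _ _).mp hss
    subst hl
    simp only [List.map_nil, List.sum_nil] at htot
    subst htot
    have hdone := pv_bloop_done ([] : List Int) (pvSufmax []) 0 (by norm_num)
    cases fuel <;> simp [pvALoop, pvBRun, hdone, pvRemoveEach]
  | cons m t ih =>
    intro l total fuel hss htot hfuel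
    have hlne : l ≠ [] := by
      intro h
      subst h
      have h' : ([] : List String) = m :: t := hss
      exact absurd h'.symm (List.cons_ne_nil m t)
    cases fuel with
    | zero =>
      exact absurd (List.eq_nil_of_length_eq_zero (Nat.le_zero.mp hfuel)) hlne
    | succ f =>
      by_cases ht150 : total ≤ 150
      · have hngt : ¬ total > 150 := by omega
        simp only [pvALoop, if_pos ht150]
        simp [pvBRun,
          pv_bloop_done (pvWc m :: List.map pvWc t) (pvSufmax (pvWc m :: List.map pvWc t)) total hngt,
          pvRemoveEach]
      · have htgt : total > 150 := by omega
        by_cases hg : (pvSufmax ((m :: t).map pvWc)).headD 0 ≥ total - 150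
        · -- a single "finishing" removal ends both programs
          obtain ⟨v, hvmem, hvge⟩ :=
            (pv_sufmax_guard ((m :: t).map pvWc) (total - 150) (by omega)).mp hg
          have hscan : pvScanFin (total - 150) ((m :: t).map pvWc) ≠ none := by
            intro hnone
            rw [pv_scan_none_iff] at hnone
            exact absurd (hnone v hvmem) (by omega)
          obtain ⟨j, hj⟩ := Option.ne_none_iff_exists'.mp hscan
          have hfin : pvFindFin total (m :: t) = some ((m :: t).getD j "") := by
            rw [pv_findFin_eq_scan, hj]
            rfl
          simp only [pvALoop, if_neg ht150, hss, hfin]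
          have hg' : (pvSufmax (pvWc m :: List.map pvWc t)).headD 0 ≥ total - 150 := hg
          have hj' : pvScanFin (total - 150) (pvWc m :: List.map pvWc t) = some j := hj
          simp [pvBRun,
            pv_bloop_fin (pvWc m :: List.map pvWc t) (pvSufmax (pvWc m :: List.map pvWc t)) total
              htgt hg',
            hj', pvRemoveEach]
        · -- no single removal suffices: both drop the shortest sentence and go on
          have hscan : pvScanFin (total - 150) ((m :: t).map pvWc) = none := by
            rw [pv_scan_none_iff]
            intro w hw
            by_contra hcon
            exact absurd ((pv_sufmax_guard _ _ (by omega)).mpr ⟨w, hw, by omega⟩) hg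
          have hfin : pvFindFin total (m :: t) = none := by
            rw [pv_findFin_eq_scan, hscan]
            rfl
          have hmin : PySem.List.min? l pvKey = some m := by
            rw [pv_min_eq_head_sorted, hss]
            rfl
          have hmem : m ∈ l := (PySem.List.mem_sorted l pvKey false m).mp
            (by rw [hss]; exact List.mem_cons_self)
          have hrem : PySem.List.remove? l m = some (l.erase m) :=
            PySem.List.remove?_eq_some_erase l m hmem
          have hlen : (l.erase m).length ≤ f := by
            have := List.length_erase_of_mem hmem
            have hpos : 0 < l.length := List.length_pos_of_ne_nil hlne
            omega
          have hsum : total - pvWc m = (t.map pvWc).sum := by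
            simp only [List.map_cons, List.sum_cons] at htot
            omega
          have hss' : PySem.List.sorted (l.erase m) pvKey = t := pv_sorted_erase l m t hss
          simp only [pvALoop, if_neg ht150, hss, hfin, hmin, hrem, Option.getD_some]
          rw [ih (l.erase m) (total - pvWc m) f hss' hsum hlen]
          exact (pv_brun_step m t l total htgt hg hrem).symm

theorem pv_top (l : List String) : remove_sentences_second l = remove_sentences_second_alt l := by
  simp only [remove_sentences_second, remove_sentences_second_alt]
  by_cases h : (l.map pvWc).sum ≤ 150
  · rw [if_pos h, if_pos h]
  · rw [if_neg h, if_neg h]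
    have hperm : ((PySem.List.sorted l pvKey).map pvWc).sum = (l.map pvWc).sum :=
      ((PySem.List.sorted_perm l pvKey false).map pvWc).sum_eq
    rw [pv_main (PySem.List.sorted l pvKey) l ((l.map pvWc).sum) l.length rfl hperm.symm le_rfl]
    rfl

-- ===== VERDICT (by name: the statement is the Claim_ definition above) =====
theorem remove_sentences_second_spec : Claim_equal_remove_sentences_second := by
  intro sentences _
  unfold Spec_remove_sentences_second
  exact pv_top sentences
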